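-- pv_equiv track=rewrite | github.com/RafailTn/msc-thesis | src/intarna_fe.py | get_mirna_position_map
-- ===== SOURCE A (Python) =====
-- def get_mirna_position_map(total_vec):
--     """Returns mapping: vector_index -> miRNA_position (0-indexed within binding region)."""
--     position_map = {}
--     mirna_pos = 0
--     for vec_idx, char in enumerate(total_vec):
--         if char in '124Dd':
--             position_map[vec_idx] = mirna_pos
--             mirna_pos += 1
--         elif char in '3e':
--             position_map[vec_idx] = None
--         else:
--             position_map[vec_idx] = mirna_pos
--     return position_map
-- ===== SOURCE B (Python) =====
-- def get_mirna_position_map(total_vec):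
--     """Returns mapping: vector_index -> miRNA_position (0-indexed within binding region)."""
--     # Collect the (sorted) vector indices of binding characters once; the miRNA
--     # position of index i is then the number of binding indices strictly below i,
--     # found by binary search (bisect_left) in that list.
--     bind_idx = [i for i, c in enumerate(total_vec) if c in '124Dd']
--
--     def rank(x):  # hand-written bisect_left (module imports nothing)
--         lo, hi = 0, len(bind_idx)
--         while lo < hi:
--             mid = (lo + hi) // 2
--             if bind_idx[mid] < x:
--                 lo = mid + 1
--             else:
--                 hi = mid
--         return lo
--
--     return {i: (None if c in '3e' else rank(i)) for i, c in enumerate(total_vec)}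
-- ===== Notes on version B (the rewrite author's own statement) =====
-- stated objective: alternative
-- what changed: Instead of threading a mutable running counter through one dict-building loop, B first collects the sorted list of binding-character indices and then maps each position to its miRNA position via a hand-written binary search (bisect_left) over that index list.
import Mathlib
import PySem

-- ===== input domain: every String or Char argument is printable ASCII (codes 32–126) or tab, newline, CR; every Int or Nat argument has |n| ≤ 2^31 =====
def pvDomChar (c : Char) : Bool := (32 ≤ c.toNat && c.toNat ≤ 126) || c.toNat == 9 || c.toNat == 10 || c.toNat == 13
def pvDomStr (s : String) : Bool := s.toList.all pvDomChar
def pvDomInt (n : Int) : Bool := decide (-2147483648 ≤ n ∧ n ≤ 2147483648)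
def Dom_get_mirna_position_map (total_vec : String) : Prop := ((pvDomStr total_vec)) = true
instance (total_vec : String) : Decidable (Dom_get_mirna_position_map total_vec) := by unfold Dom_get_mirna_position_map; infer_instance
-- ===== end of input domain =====

-- B replaces A's counter-threading dict loop by collecting the sorted binding-index list once and binary-searching (bisect_left) it per position (alternative algorithm, same results).


-- ===== PORT A =====
-- `char in '124Dd'` / `char in '3e'` on a single char is exactly membership in those characters
def pvInF (c : Char) : Bool := c == '1' || c == '2' || c == '4' || c == 'D' || c == 'd'
def pvInN (c : Char) : Bool := c == '3' || c == 'e'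

def get_mirna_position_map (total_vec : String) : List (Int × Option Int) :=
  -- state = (position_map, mirna_pos); the dict is returned as its items list
  (((PySem.List.enumerate total_vec.toList 0).foldl
      (fun (st : PySem.Dict Int (Option Int) × Int) p =>
        if pvInF p.2 then (st.1.insert p.1 (some st.2), st.2 + 1)
        else if pvInN p.2 then (st.1.insert p.1 none, st.2)
        else (st.1.insert p.1 (some st.2), st.2))
      (PySem.Dict.empty, 0)).1).items

-- ===== PORT B =====
-- `[i for i, c in enumerate(total_vec) if c in '124Dd']`
def pvBindIdx (cs : List Char) : List Int :=
  ((PySem.List.enumerate cs 0).filter (fun p => pvInF p.2)).map Prod.fst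

-- Source B's hand-written `rank` is the classic bisect_left lo/hi loop with mid = (lo+hi)//2,
-- exactly PySem.List.bisectLeft's loop (same steps, same midpoints).
def get_mirna_position_map_alt (total_vec : String) : List (Int × Option Int) :=
  let bindIdx := pvBindIdx total_vec.toList
  (PySem.List.enumerate total_vec.toList 0).map
    (fun p => (p.1, if pvInN p.2 then none
                    else some ((PySem.List.bisectLeft bindIdx p.1 : Nat) : Int)))

-- ===== PRECONDITION & SPEC =====
def Spec_get_mirna_position_map (total_vec : String) (out : List (Int × Option Int)) : Prop := out = get_mirna_position_map_alt total_vec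
instance (total_vec : String) (out : List (Int × Option Int)) : Decidable (Spec_get_mirna_position_map total_vec out) := by unfold Spec_get_mirna_position_map; infer_instance

-- ===== CLAIM (what is proved, stated in full; the proofs are below) =====
def Claim_equal_get_mirna_position_map : Prop := ∀ (total_vec : String), Dom_get_mirna_position_map total_vec → Spec_get_mirna_position_map total_vec (get_mirna_position_map total_vec)

-- ===== LEMMAS AND PROOFS =====

-- canonical result of A's loop: position s gets (if '3e' then none else the running count k)
def pvG : List Char → Int → Int → List (Int × Option Int)
  | [], _, _ => []
  | c :: cs, s, k =>
      (s, if pvInN c then none else some k) :: pvG cs (s + 1) (k + (if pvInF c then 1 else 0))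

theorem pvInF_not_inN (c : Char) (h : pvInF c = true) : pvInN c = false := by
  simp [pvInF] at h
  rcases h with (((h | h) | h) | h) | h <;> subst h <;> decide

theorem pvA_loop (cs : List Char) : ∀ (s k : Int) (d : PySem.Dict Int (Option Int)),
    (∀ x ∈ d.keys, x < s) →
    (((PySem.List.enumerate cs s).foldl
      (fun (st : PySem.Dict Int (Option Int) × Int) p =>
        if pvInF p.2 then (st.1.insert p.1 (some st.2), st.2 + 1)
        else if pvInN p.2 then (st.1.insert p.1 none, st.2)
        else (st.1.insert p.1 (some st.2), st.2))
      (d, k)).1).items = d.items ++ pvG cs s k := by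
  induction cs with
  | nil => intro s k d _; simp [PySem.List.enumerate_nil, pvG]
  | cons c cs ih =>
    intro s k d hk
    have hfresh : d.contains s = false := by
      by_contra h
      have : s ∈ d.keys := (PySem.Dict.contains_iff_mem_keys d s).mp (by
        cases hc : d.contains s
        · exact absurd hc h
        · rfl)
      exact absurd (hk s this) (lt_irrefl s)
    have hkeys : ∀ (v : Option Int) (x : Int), x ∈ (d.insert s v).keys → x < s + 1 := by
      intro v x hx
      rcases (PySem.Dict.mem_keys_insert d s x v).mp hx with h | h
      · omega
      · have := hk x h; omega
    rw [PySem.List.enumerate_cons]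
    simp only [List.foldl_cons]
    by_cases hF : pvInF c = true
    · have hN := pvInF_not_inN c hF
      simp only [hF, if_true]
      rw [ih (s + 1) (k + 1) _ (hkeys (some k))]
      rw [PySem.Dict.items_insert_of_not_contains d _ hfresh]
      simp [pvG, hF, hN]
    · by_cases hN : pvInN c = true
      · simp only [hF, hN, if_true, if_false, Bool.false_eq_true]
        rw [ih (s + 1) k _ (hkeys none)]
        rw [PySem.Dict.items_insert_of_not_contains d _ hfresh]
        simp [pvG, hF, hN]
      · simp only [hF, hN, Bool.false_eq_true, if_false]
        rw [ih (s + 1) k _ (hkeys (some k))]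
        rw [PySem.Dict.items_insert_of_not_contains d _ hfresh]
        simp [pvG, hF, hN]

-- number of binding chars among the first m positions (m as an Int)
def pvCntF : List Char → Int → Nat
  | [], _ => 0
  | c :: cs, m => if m ≤ 0 then 0 else (if pvInF c then 1 else 0) + pvCntF cs (m - 1)

theorem pvCntF_nonpos (cs : List Char) (m : Int) (h : m ≤ 0) : pvCntF cs m = 0 := by
  cases cs with
  | nil => rfl
  | cons c cs => simp [pvCntF, h]

-- pvG's threaded counter at position p.1 is k plus the binding count strictly before it
theorem pvG_eq (cs : List Char) : ∀ (s k : Int),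
    pvG cs s k = (PySem.List.enumerate cs s).map
      (fun p => (p.1, if pvInN p.2 then none else some (k + (pvCntF cs (p.1 - s) : Int)))) := by
  induction cs with
  | nil => intro s k; simp [pvG, PySem.List.enumerate_nil]
  | cons c cs ih =>
    intro s k
    rw [PySem.List.enumerate_cons]
    simp only [List.map_cons, pvG]
    congr 1
    · simp
    · rw [ih (s + 1) (k + (if pvInF c then 1 else 0))]
      apply List.map_congr_left
      intro p hp
      rcases (PySem.List.mem_enumerate_iff _ _ _).mp hp with ⟨j, hj, rfl⟩
      have h1 : pvCntF (c :: cs) (s + 1 + (j : Int) - s) =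
          (if pvInF c then 1 else 0) + pvCntF cs (s + 1 + (j : Int) - (s + 1)) := by
        have hpos : ¬ (s + 1 + (j : Int) - s ≤ 0) := by omega
        have : s + 1 + (j : Int) - s - 1 = s + 1 + (j : Int) - (s + 1) := by omega
        simp [pvCntF, hpos, this]
      simp only [h1]
      by_cases hN : pvInN c <;> by_cases hF : pvInF c <;>
        simp [hN, hF, add_assoc]

-- the index list is nondecreasing (enumerate indices strictly increase)
theorem pvBindIdx_pairwise (cs : List Char) :
    (pvBindIdx cs).Pairwise (fun a b => a ≤ b) := by
  unfold pvBindIdx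
  have h := PySem.List.pairwise_lt_enumerate cs (0 : Int)
  exact (List.Pairwise.map Prod.fst (by intro a b hab; exact le_of_lt hab)
    (h.filter (fun p => pvInF p.2)))

-- a split point r (everything before < x, everything from r on ≥ x) IS the count of elements < x
theorem pvCountP_of_split (xs : List Int) (x : Int) : ∀ (r : Nat), r ≤ xs.length →
    (∀ (j : Nat) (hj : j < xs.length), j < r → xs[j] < x) →
    (∀ (j : Nat) (hj : j < xs.length), r ≤ j → x ≤ xs[j]) →
    xs.countP (fun y => decide (y < x)) = r := by
  induction xs with
  | nil => intro r hr _ _; simpa using (Nat.le_zero.mp hr).symm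
  | cons y ys ih =>
    intro r hr hlt hge
    cases r with
    | zero =>
      have hy : ¬ (y < x) := not_lt.mpr (hge 0 (by simp) (Nat.zero_le _))
      simp only [List.countP_cons, decide_eq_true_eq]
      rw [ih 0 (Nat.zero_le _) (by intro j hj h; omega)
        (by intro j hj _; exact hge (j + 1) (by simpa using Nat.succ_lt_succ hj) (Nat.zero_le _))]
      simp [hy]
    | succ r' =>
      have hy : y < x := hlt 0 (by simp) (Nat.succ_pos _)
      simp only [List.countP_cons, decide_eq_true_eq]
      rw [ih r' (by simpa using hr)
        (by intro j hj h; exact hlt (j + 1) (by simpa using Nat.succ_lt_succ hj) (by omega))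
        (by intro j hj h; exact hge (j + 1) (by simpa using Nat.succ_lt_succ hj) (by omega))]
      simp [hy]

-- bisect_left on a sorted list returns the number of elements < x
theorem pvBisect_eq_countP (xs : List Int) (x : Int)
    (hs : xs.Pairwise (fun a b => a ≤ b)) :
    PySem.List.bisectLeft xs x = xs.countP (fun y => decide (y < x)) := by
  obtain ⟨hle, hlt, hge⟩ := PySem.List.bisectLeft_spec xs x hs
  exact (pvCountP_of_split xs x _ hle (fun j hj h => hlt j hj h) (fun j hj h => hge j hj h)).symm

-- counting binding indices below x equals the prefix binding count
theorem pvCountP_bindIdx (cs : List Char) : ∀ (t x : Int),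
    (((PySem.List.enumerate cs t).filter (fun p => pvInF p.2)).map Prod.fst).countP
      (fun y => decide (y < x)) = pvCntF cs (x - t) := by
  induction cs with
  | nil => intro t x; simp [PySem.List.enumerate_nil, pvCntF]
  | cons c cs ih =>
    intro t x
    rw [PySem.List.enumerate_cons]
    by_cases hF : pvInF c
    · by_cases htx : t < x
      · have h1 : ¬ (x - t ≤ 0) := by omega
        have h2 : x - t - 1 = x - (t + 1) := by omega
        simp [hF, htx, ih (t + 1) x, pvCntF, h1, h2, Nat.add_comm]
      · have h1 : x - t ≤ 0 := by omega
        have h2 : pvCntF cs (x - (t + 1)) = 0 := pvCntF_nonpos _ _ (by omega)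
        simp [hF, htx, ih (t + 1) x, pvCntF, h1, h2]
    · by_cases h1 : x - t ≤ 0
      · have h2 : pvCntF cs (x - (t + 1)) = 0 := pvCntF_nonpos _ _ (by omega)
        simp [hF, ih (t + 1) x, pvCntF, h1, h2]
      · have h2 : x - t - 1 = x - (t + 1) := by omega
        simp [hF, ih (t + 1) x, pvCntF, h1, h2]

-- ===== VERDICT (by name: the statement is the Claim_ definition above) =====
theorem get_mirna_position_map_spec : Claim_equal_get_mirna_position_map := by
  intro tv _
  show get_mirna_position_map tv = get_mirna_position_map_alt tv
  unfold get_mirna_position_map get_mirna_position_map_alt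
  rw [pvA_loop tv.toList 0 0 PySem.Dict.empty (by simp [PySem.Dict.keys_empty])]
  rw [pvG_eq tv.toList 0 0]
  rw [show (PySem.Dict.empty : PySem.Dict Int (Option Int)).items = [] from rfl, List.nil_append]
  apply List.map_congr_left
  intro p _
  have hb : PySem.List.bisectLeft (pvBindIdx tv.toList) p.1 = pvCntF tv.toList (p.1 - 0) := by
    rw [pvBisect_eq_countP _ _ (pvBindIdx_pairwise tv.toList)]
    exact pvCountP_bindIdx tv.toList 0 p.1
  simp [hb]
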